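-- pv_equiv track=rewrite | github.com/FuqingZh/axiomkit | py/src/axiomkit/XlsxFormatter.py | _blank_vertical_block_text
-- ===== SOURCE A (Python) =====
-- def _blank_vertical_block_text(header_grid: list[list[str]]) -> list[list[str]]:
--     """
--     Copy grid and blank out texts in vertical runs except the first row of each run.
--     """
--     if not header_grid:
--         return header_grid
--     out = [row[:] for row in header_grid]
--     n_rows = len(out)
--     n_cols = len(out[0])
--
--     for c in range(n_cols):
--         r = 0
--         while r < n_rows:
--             v = out[r][c]
--             if not v:
--                 r += 1
--                 continue
--             k = r + 1
--             while k < n_rows and out[k][c] == v: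
--                 k += 1
--             if k - r > 1:
--                 for rr in range(r + 1, k):
--                     out[rr][c] = ""
--             r = k
--     return out
-- ===== SOURCE B (Python) =====
-- def _blank_vertical_block_text(header_grid: list[list[str]]) -> list[list[str]]:
--     """
--     Copy grid and blank out texts in vertical runs except the first row of each run.
--     Each cell is compared directly with the cell above in the ORIGINAL grid.
--     """
--     if not header_grid:
--         return header_grid
--     n_cols = len(header_grid[0])
--     out = [header_grid[0][:]]
--     for prev, row in zip(header_grid, header_grid[1:]):
--         new = row[:]
--         for c in range(n_cols):
--             if new[c] and new[c] == prev[c]: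
--                 new[c] = ""
--         out.append(new)
--     return out
-- ===== Notes on version B (the rewrite author's own statement) =====
-- stated objective: simpler
-- what changed: Replaces A's column-wise maximal-run scan (outer while, inner while to find run end, then a range-blank pass) with a single row-by-row pass that blanks each cell iff it is non-empty and equals the cell directly above it in the original grid; Pre_ excludes only grids with a row shorter than the first row, on which A raises IndexError.
import Mathlib
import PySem

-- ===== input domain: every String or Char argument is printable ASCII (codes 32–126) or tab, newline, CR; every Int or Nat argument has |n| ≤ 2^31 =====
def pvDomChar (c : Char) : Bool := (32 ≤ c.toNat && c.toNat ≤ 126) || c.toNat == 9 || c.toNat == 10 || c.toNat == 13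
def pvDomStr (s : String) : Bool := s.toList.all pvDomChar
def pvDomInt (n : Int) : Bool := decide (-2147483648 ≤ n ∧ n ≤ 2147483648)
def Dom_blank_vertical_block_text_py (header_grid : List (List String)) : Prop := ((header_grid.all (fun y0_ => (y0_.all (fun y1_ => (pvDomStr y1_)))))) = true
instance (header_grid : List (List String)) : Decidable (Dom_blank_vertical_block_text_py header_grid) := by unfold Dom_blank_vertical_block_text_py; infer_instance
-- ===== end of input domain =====

-- B replaces A's column-wise maximal-run scan with a single row-by-row pass that blanks
-- each cell iff it is non-empty and equals the cell directly above it in the original grid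
-- (objective: simpler). Pre_ excludes grids with a row shorter than the first row, on which A raises.


-- ===== PORT A =====
-- out[r][c] (always in range inside Pre_; the getD default is never read there)
def pvCell (g : List (List String)) (r c : Nat) : String := (g.getD r []).getD c ""

-- out[r][c] = v  (functional update for Python's in-place assignment)
def pvSetCell (g : List (List String)) (r c : Nat) (v : String) : List (List String) :=
  g.set r ((g.getD r []).set c v)

-- inner 'while k < n_rows and out[k][c] == v: k += 1'
def pvScanK (out : List (List String)) (c n : Nat) (v : String) (k : Nat) : Nat :=
  if h : k < n ∧ pvCell out k c = v then pvScanK out c n v (k + 1) else k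
termination_by n - k
decreasing_by omega

-- (termination fact for pvRowLoop, cited by its decreasing_by)
theorem pvScanK_ge (out : List (List String)) (c n : Nat) (v : String) (k : Nat) :
    k ≤ pvScanK out c n v k := by
  fun_induction pvScanK <;> omega

-- 'for rr in range(r+1, k): out[rr][c] = ""'
def pvBlankRange (out : List (List String)) (c lo hi : Nat) : List (List String) :=
  (List.range' lo (hi - lo)).foldl (fun o rr => pvSetCell o rr c "") out

-- one column c of 'for c in range(n_cols): r = 0; while r < n_rows: ...'
def pvRowLoop (out : List (List String)) (c n r : Nat) : List (List String) :=
  if hr : r < n then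
    let v := pvCell out r c
    if v = "" then pvRowLoop out c n (r + 1)
    else
      let k := pvScanK out c n v (r + 1)
      let out' := if k - r > 1 then pvBlankRange out c (r + 1) k else out
      pvRowLoop out' c n k
  else out
termination_by n - r
decreasing_by
  · omega
  · have := pvScanK_ge out c n (pvCell out r c) (r + 1); omega

def blank_vertical_block_text_py (header_grid : List (List String)) : List (List String) :=
  if header_grid = [] then header_grid
  else
    let out := header_grid
    let n_rows := out.length
    let n_cols := (out.headD []).length
    (List.range n_cols).foldl (fun o c => pvRowLoop o c n_rows 0) out

-- ===== PORT B =====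
-- inner 'for c in range(n_cols): if new[c] and new[c] == prev[c]: new[c] = ""'
def pvBlankRow (prev row : List String) (n_cols : Nat) : List String :=
  (List.range n_cols).foldl
    (fun nw c => if nw.getD c "" ≠ "" ∧ nw.getD c "" = prev.getD c "" then nw.set c "" else nw)
    row

def blank_vertical_block_text_py_alt (header_grid : List (List String)) : List (List String) :=
  match header_grid with
  | [] => header_grid
  | h :: t =>
    let n_cols := h.length
    h :: (header_grid.zip t).map (fun pr => pvBlankRow pr.1 pr.2 n_cols)

-- ===== PRECONDITION & SPEC =====
-- Pre_ excludes exactly the jagged grids with a row shorter than the first row,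
-- on which the Python A raises IndexError.
def Pre_blank_vertical_block_text_py (header_grid : List (List String)) : Prop :=
  ∀ row ∈ header_grid, (header_grid.headD []).length ≤ row.length
instance (header_grid : List (List String)) : Decidable (Pre_blank_vertical_block_text_py header_grid) := by unfold Pre_blank_vertical_block_text_py; infer_instance

def pvWitness_blank_vertical_block_text_py : List (List String) :=
  [["a", "b"], ["a", "c"], ["a", "c"]]

def Spec_blank_vertical_block_text_py (header_grid : List (List String)) (out : List (List String)) : Prop := out = blank_vertical_block_text_py_alt header_grid
instance (header_grid : List (List String)) (out : List (List String)) : Decidable (Spec_blank_vertical_block_text_py header_grid out) := by unfold Spec_blank_vertical_block_text_py; infer_instance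

-- ===== CLAIM (what is proved, stated in full; the proofs are below) =====
def Claim_equal_blank_vertical_block_text_py : Prop := ∀ (header_grid : List (List String)), Dom_blank_vertical_block_text_py header_grid → Pre_blank_vertical_block_text_py header_grid → Spec_blank_vertical_block_text_py header_grid (blank_vertical_block_text_py header_grid)

-- ===== LEMMAS AND PROOFS =====

-- a cell (of row k ≥ 1) is blanked iff non-empty and equal to the cell above it, in the original grid
def pvRule (g : List (List String)) (k c : Nat) : Bool :=
  (k != 0) && (pvCell g k c != "") && (pvCell g k c == pvCell g (k - 1) c)

theorem pvRule_iff (g : List (List String)) (k c : Nat) :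
    pvRule g k c = true ↔ k ≠ 0 ∧ pvCell g k c ≠ "" ∧ pvCell g k c = pvCell g (k - 1) c := by
  simp [pvRule, and_assoc]

theorem cell_setCell (g : List (List String)) (r c : Nat) (v : String) (k c' : Nat) :
    pvCell (pvSetCell g r c v) k c' =
      if k = r ∧ c' = c ∧ r < g.length ∧ c < (g.getD r []).length then v
      else pvCell g k c' := by
  simp only [pvCell, pvSetCell, List.getD_eq_getElem?_getD]
  by_cases hk : k = r
  · subst hk
    by_cases hr : k < g.length
    · rw [List.getElem?_set_self hr, List.getElem?_eq_getElem hr]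
      simp only [Option.getD_some]
      by_cases hc : c' = c
      · subst hc
        by_cases hcl : c' < g[k].length
        · rw [List.getElem?_set_self hcl]
          rw [if_pos (by exact ⟨trivial, rfl, hr, hcl⟩)]
          rfl
        · rw [List.set_eq_of_length_le (by omega)]
          rw [if_neg (by tauto)]
      · rw [List.getElem?_set_ne (fun h => hc h.symm)]
        rw [if_neg (by tauto)]
    · rw [List.set_eq_of_length_le (by omega)]
      rw [if_neg (by tauto)]
  · rw [List.getElem?_set_ne (fun h => hk h.symm)]
    rw [if_neg (by tauto)]

theorem setCell_length (g : List (List String)) (r c : Nat) (v : String) :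
    (pvSetCell g r c v).length = g.length := by simp [pvSetCell]

theorem setCell_rowLen (g : List (List String)) (r c : Nat) (v : String) (i : Nat) :
    ((pvSetCell g r c v).getD i []).length = ((g.getD i []).length) := by
  unfold pvSetCell
  by_cases hi : i = r
  · subst hi
    by_cases hr : i < g.length
    · simp only [List.getD_eq_getElem?_getD, List.getElem?_set_self hr,
        List.getElem?_eq_getElem hr, Option.getD_some, List.length_set]
    · rw [List.set_eq_of_length_le (by omega)]
  · simp only [List.getD_eq_getElem?_getD, List.getElem?_set_ne (fun h => hi h.symm)]

theorem blankFold_length (c : Nat) (m : Nat) : ∀ (lo : Nat) (out : List (List String)),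
    ((List.range' lo m).foldl (fun o rr => pvSetCell o rr c "") out).length = out.length := by
  induction m with
  | zero => intro lo out; simp
  | succ m ih =>
    intro lo out
    rw [List.range'_succ, List.foldl_cons, ih]
    exact setCell_length ..

theorem blankFold_rowLen (c : Nat) (m : Nat) : ∀ (lo : Nat) (out : List (List String)) (i : Nat),
    (((List.range' lo m).foldl (fun o rr => pvSetCell o rr c "") out).getD i []).length
      = (out.getD i []).length := by
  induction m with
  | zero => intro lo out i; simp
  | succ m ih =>
    intro lo out i
    rw [List.range'_succ, List.foldl_cons, ih]
    exact setCell_rowLen ..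

theorem blankFold_cell (c : Nat) (m : Nat) : ∀ (lo : Nat) (out : List (List String)) (k c' : Nat),
    pvCell ((List.range' lo m).foldl (fun o rr => pvSetCell o rr c "") out) k c' =
      if c' = c ∧ lo ≤ k ∧ k < lo + m ∧ k < out.length ∧ c < (out.getD k []).length then ""
      else pvCell out k c' := by
  induction m with
  | zero =>
    intro lo out k c'
    rw [if_neg (by omega)]
    rfl
  | succ m ih =>
    intro lo out k c'
    rw [List.range'_succ, List.foldl_cons, ih, setCell_length, setCell_rowLen, cell_setCell]
    by_cases hc' : c' = c
    · subst hc'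
      by_cases hklo : k = lo
      · subst hklo
        by_cases hin : k < out.length ∧ c' < (out.getD k []).length
        · rw [if_neg (by omega), if_pos ⟨rfl, rfl, hin.1, hin.2⟩,
            if_pos ⟨rfl, by omega, by omega, hin.1, hin.2⟩]
        · rw [if_neg (by tauto), if_neg (by tauto), if_neg (by tauto)]
      · by_cases hrest : lo + 1 ≤ k ∧ k < lo + 1 + m ∧ k < out.length ∧ c' < (out.getD k []).length
        · rw [if_pos ⟨rfl, hrest.1, hrest.2.1, hrest.2.2.1, hrest.2.2.2⟩,
            if_pos ⟨rfl, by omega, by omega, hrest.2.2.1, hrest.2.2.2⟩]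
        · rw [if_neg (by tauto), if_neg (fun h => hklo (by omega)), if_neg (by omega)]

    · rw [if_neg (by tauto), if_neg (by tauto), if_neg (by tauto)]

theorem blankRange_length (out : List (List String)) (c lo hi : Nat) :
    (pvBlankRange out c lo hi).length = out.length := blankFold_length ..

theorem blankRange_rowLen (out : List (List String)) (c lo hi : Nat) (i : Nat) :
    ((pvBlankRange out c lo hi).getD i []).length = (out.getD i []).length := blankFold_rowLen ..

theorem blankRange_cell (out : List (List String)) (c lo hi k c' : Nat) :
    pvCell (pvBlankRange out c lo hi) k c' =
      if c' = c ∧ lo ≤ k ∧ k < hi ∧ k < out.length ∧ c < (out.getD k []).length then ""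
      else pvCell out k c' := by
  rw [pvBlankRange, blankFold_cell]
  by_cases h : c' = c ∧ lo ≤ k ∧ k < hi ∧ k < out.length ∧ c < (out.getD k []).length
  · rw [if_pos ⟨h.1, h.2.1, by omega, h.2.2.2⟩, if_pos h]
  · rw [if_neg (fun hx => h ⟨hx.1, hx.2.1, by omega, hx.2.2.2⟩), if_neg h]

theorem scanK_spec (out : List (List String)) (c n : Nat) (v : String) (k0 : Nat) :
    k0 ≤ n →
    (k0 ≤ pvScanK out c n v k0 ∧ pvScanK out c n v k0 ≤ n ∧
      (∀ i, k0 ≤ i → i < pvScanK out c n v k0 → pvCell out i c = v) ∧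
      (pvScanK out c n v k0 < n → pvCell out (pvScanK out c n v k0) c ≠ v)) := by
  fun_induction pvScanK with
  | case1 k h ih =>
    intro _
    obtain ⟨ih1, ih2, ih3, ih4⟩ := ih (by omega)
    refine ⟨by omega, ih2, ?_, ih4⟩
    intro i hi1 hi2
    rcases Nat.eq_or_lt_of_le hi1 with h' | h'
    · exact h' ▸ h.2
    · exact ih3 i h' hi2
  | case2 k h =>
    intro h0
    refine ⟨le_refl _, h0, by omega, ?_⟩
    intro hk
    have : ¬ (k < n ∧ pvCell out k c = v) := h
    tauto

theorem rowLoop_length (out : List (List String)) (c n r : Nat) :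
    (pvRowLoop out c n r).length = out.length := by
  fun_induction pvRowLoop with
  | case1 out r hr v hv ih => exact ih
  | case2 out r hr v hv k out' ih =>
    rw [ih]
    simp only [out']
    split <;> simp [blankRange_length]
  | case3 => rfl

theorem rowLoop_rowLen (out : List (List String)) (c n r : Nat) (i : Nat) :
    ((pvRowLoop out c n r).getD i []).length = (out.getD i []).length := by
  fun_induction pvRowLoop with
  | case1 out r hr v hv ih => exact ih
  | case2 out r hr v hv k out' ih =>
    rw [ih]
    simp only [out']
    split
    · exact blankRange_rowLen ..
    · rfl
  | case3 => rfl

theorem rowLoop_cell (g : List (List String)) (c n : Nat) (hn : n = g.length)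
    (hw : ∀ i, i < n → c < (g.getD i []).length) :
    ∀ (m r : Nat) (out : List (List String)), n - r ≤ m →
    out.length = n →
    (∀ i, (out.getD i []).length = (g.getD i []).length) →
    (∀ i, r ≤ i → pvCell out i c = pvCell g i c) →
    (r < n → ¬ (pvRule g r c = true)) →
    ∀ k c', pvCell (pvRowLoop out c n r) k c' =
      if c' = c ∧ r ≤ k ∧ k < n ∧ pvRule g k c = true then "" else pvCell out k c' := by
  intro m
  induction m with
  | zero =>
    intro r out hm hlen hshape hagree hbound k c'
    rw [pvRowLoop, dif_neg (by omega), if_neg (by omega)]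
  | succ m ih =>
    intro r out hm hlen hshape hagree hbound k c'
    rw [pvRowLoop]
    by_cases hr : r < n
    · rw [dif_pos hr]
      simp only
      have hvg : pvCell out r c = pvCell g r c := hagree r (le_refl r)
      by_cases hv : pvCell out r c = ""
      · rw [if_pos hv]
        have hbound' : r + 1 < n → ¬ (pvRule g (r + 1) c = true) := by
          intro _ hrule
          obtain ⟨-, h2, h3⟩ := (pvRule_iff ..).mp hrule
          simp only [Nat.add_sub_cancel] at h3
          rw [h3, ← hvg] at h2
          exact h2 hv
        rw [ih (r + 1) out (by omega) hlen hshape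
            (fun i hi => hagree i (by omega)) hbound' k c']
        by_cases hkr : k = r
        · subst hkr
          rw [if_neg (by omega), if_neg (fun h => (hbound hr) h.2.2.2)]
        · by_cases hrest : c' = c ∧ r + 1 ≤ k ∧ k < n ∧ pvRule g k c = true
          · rw [if_pos hrest, if_pos ⟨hrest.1, by omega, hrest.2.2⟩]
          · rw [if_neg hrest, if_neg (fun h => hrest ⟨h.1, by omega, h.2.2⟩)]
      · rw [if_neg hv]
        obtain ⟨hs1, hs2, hs3, hs4⟩ :=
          scanK_spec out c n (pvCell out r c) (r + 1) (by omega)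
        set kk := pvScanK out c n (pvCell out r c) (r + 1) with hkk
        have hout'cell : ∀ k' c',
            pvCell (if kk - r > 1 then pvBlankRange out c (r + 1) kk else out) k' c' =
            if c' = c ∧ r + 1 ≤ k' ∧ k' < kk then "" else pvCell out k' c' := by
          intro k' c'
          split_ifs with hgt h2 h3
          · rw [blankRange_cell, if_pos ⟨h2.1, h2.2.1, h2.2.2, by omega,
              by rw [hshape k']; exact hw k' (by omega)⟩]
          · rw [blankRange_cell, if_neg (by tauto)]
          · exact absurd h3 (by omega)
          · rfl
        have hout'len :
            (if kk - r > 1 then pvBlankRange out c (r + 1) kk else out).length = n := by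
          split <;> simp [blankRange_length, hlen]
        have hout'shape : ∀ i,
            ((if kk - r > 1 then pvBlankRange out c (r + 1) kk else out).getD i []).length
              = (g.getD i []).length := by
          intro i
          split
          · rw [blankRange_rowLen]; exact hshape i
          · exact hshape i
        have hrung : ∀ i, r ≤ i → i < kk → pvCell g i c = pvCell out r c := by
          intro i hi1 hi2
          rcases Nat.eq_or_lt_of_le hi1 with h' | h'
          · rw [← h', ← hvg]
          · rw [← hagree i hi1]; exact hs3 i (by omega) hi2
        have hagree' : ∀ i, kk ≤ i →
            pvCell (if kk - r > 1 then pvBlankRange out c (r + 1) kk else out) i c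
              = pvCell g i c := by
          intro i hi
          rw [hout'cell, if_neg (by omega)]
          exact hagree i (by omega)
        have hbound' : kk < n → ¬ (pvRule g kk c = true) := by
          intro hkn hrule
          obtain ⟨-, -, h3⟩ := (pvRule_iff ..).mp hrule
          have h1 : pvCell g kk c ≠ pvCell out r c := by
            rw [← hagree kk (by omega)]; exact hs4 hkn
          have h2 : pvCell g (kk - 1) c = pvCell out r c :=
            hrung (kk - 1) (by omega) (by omega)
          exact h1 (h2 ▸ h3)
        rw [ih kk (if kk - r > 1 then pvBlankRange out c (r + 1) kk else out)
            (by omega) hout'len hout'shape hagree' hbound' k c', hout'cell]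
        by_cases hc' : c' = c
        · by_cases h1 : k < r + 1
          · by_cases hkr : k = r
            · rw [if_neg (fun h => absurd h.2.1 (by omega)),
                if_neg (fun h => absurd h.2.1 (by omega)),
                if_neg (fun h => hbound hr (by rw [hkr] at h; exact h.2.2.2))]
            · rw [if_neg (fun h => absurd h.2.1 (by omega)),
                if_neg (fun h => absurd h.2.1 (by omega)),
                if_neg (fun h => absurd h.2.1 (by omega))]
          · by_cases h2 : k < kk
            · rw [if_neg (fun h => absurd h.2.1 (by omega)), if_pos ⟨hc', by omega, h2⟩,
                if_pos ⟨hc', by omega, by omega, (pvRule_iff ..).mpr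
                  ⟨by omega, by rw [hrung k (by omega) h2]; exact hv,
                   by rw [hrung k (by omega) h2, hrung (k - 1) (by omega) (by omega)]⟩⟩]
            · by_cases h3 : k < n ∧ pvRule g k c = true
              · rw [if_pos ⟨hc', by omega, h3.1, h3.2⟩, if_pos ⟨hc', by omega, h3.1, h3.2⟩]
              · rw [if_neg (fun h => h3 ⟨h.2.2.1, h.2.2.2⟩),
                  if_neg (fun h => absurd h.2.2 (by omega)),
                  if_neg (fun h => h3 ⟨h.2.2.1, h.2.2.2⟩)]
        · rw [if_neg (fun h => hc' h.1), if_neg (fun h => hc' h.1), if_neg (fun h => hc' h.1)]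
    · rw [dif_neg hr, if_neg (by omega)]

theorem foldCols_spec (g : List (List String))
    (hpre : ∀ row ∈ g, (g.headD []).length ≤ row.length) :
    ∀ m, m ≤ (g.headD []).length →
    ((List.range m).foldl (fun o c => pvRowLoop o c g.length 0) g).length = g.length ∧
    (∀ i, (((List.range m).foldl (fun o c => pvRowLoop o c g.length 0) g).getD i []).length
        = (g.getD i []).length) ∧
    (∀ k c', pvCell ((List.range m).foldl (fun o c => pvRowLoop o c g.length 0) g) k c' =
      if c' < m ∧ k < g.length ∧ pvRule g k c' = true then "" else pvCell g k c') := by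
  intro m
  induction m with
  | zero =>
    intro _
    refine ⟨by simp, fun i => by simp, fun k c' => ?_⟩
    rw [if_neg (by omega)]
    simp
  | succ m ih =>
    intro hm
    obtain ⟨ih1, ih2, ih3⟩ := ih (by omega)
    have hstep : (List.range (m + 1)).foldl (fun o c => pvRowLoop o c g.length 0) g
        = pvRowLoop ((List.range m).foldl (fun o c => pvRowLoop o c g.length 0) g) m
            g.length 0 := by
      rw [List.range_succ, List.foldl_append, List.foldl_cons, List.foldl_nil]
    have hw : ∀ i, i < g.length → m < (g.getD i []).length := by
      intro i hi
      have := hpre (g.getD i []) (by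
        rw [List.getD_eq_getElem g [] hi]; exact List.getElem_mem hi)
      omega
    have hagree : ∀ i, 0 ≤ i →
        pvCell ((List.range m).foldl (fun o c => pvRowLoop o c g.length 0) g) i m
          = pvCell g i m := by
      intro i _
      rw [ih3 i m, if_neg (by omega)]
    have hbound : (0 : Nat) < g.length → ¬ (pvRule g 0 m = true) := by
      intro _ hrule
      exact ((pvRule_iff ..).mp hrule).1 rfl
    have hcell := rowLoop_cell g m g.length rfl hw g.length 0
      ((List.range m).foldl (fun o c => pvRowLoop o c g.length 0) g) (by omega)
      ih1 ih2 hagree hbound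
    rw [hstep]
    refine ⟨by rw [rowLoop_length, ih1], fun i => by rw [rowLoop_rowLen, ih2 i], fun k c' => ?_⟩
    rw [hcell k c', ih3 k c']
    by_cases hc' : c' = m
    · by_cases hrest : k < g.length ∧ pvRule g k c' = true
      · rw [if_pos ⟨hc', by omega, hrest.1, hc' ▸ hrest.2⟩,
          if_pos ⟨by omega, hrest.1, hrest.2⟩]
      · rw [if_neg (fun h => hrest ⟨h.2.2.1, hc' ▸ h.2.2.2⟩),
          if_neg (fun h => hrest ⟨h.2.1, h.2.2⟩), if_neg (fun h => hrest ⟨h.2.1, h.2.2⟩)]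
    · by_cases hrest : c' < m ∧ k < g.length ∧ pvRule g k c' = true
      · rw [if_neg (fun h => hc' h.1), if_pos hrest, if_pos ⟨by omega, hrest.2.1, hrest.2.2⟩]
      · rw [if_neg (fun h => hc' h.1), if_neg hrest,
          if_neg (fun h => hrest ⟨by omega, h.2.1, h.2.2⟩)]

theorem blankRow_step (prev row : List String) (m : Nat) :
    pvBlankRow prev row (m + 1) =
      if (pvBlankRow prev row m).getD m "" ≠ "" ∧
          (pvBlankRow prev row m).getD m "" = prev.getD m "" then
        (pvBlankRow prev row m).set m ""
      else pvBlankRow prev row m := by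
  rw [pvBlankRow, List.range_succ, List.foldl_append, List.foldl_cons, List.foldl_nil]
  rfl

theorem blankRow_length (prev row : List String) (m : Nat) :
    (pvBlankRow prev row m).length = row.length := by
  induction m with
  | zero => rfl
  | succ m ih =>
    rw [blankRow_step]
    split
    · rw [List.length_set, ih]
    · exact ih

theorem blankRow_getD_ge (prev row : List String) (m c : Nat) (hc : m ≤ c) :
    (pvBlankRow prev row m).getD c "" = row.getD c "" := by
  induction m with
  | zero => rfl
  | succ m ih =>
    rw [blankRow_step]
    have ihm := ih (by omega)
    split
    · rw [List.getD_eq_getElem?_getD, List.getElem?_set_ne (by omega),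
        ← List.getD_eq_getElem?_getD, ihm]
    · exact ihm

theorem blankRow_getD_lt (prev row : List String) (m c : Nat) (hc : c < m) :
    (pvBlankRow prev row m).getD c "" =
      if row.getD c "" ≠ "" ∧ row.getD c "" = prev.getD c "" then "" else row.getD c "" := by
  induction m with
  | zero => omega
  | succ m ih =>
    rw [blankRow_step]
    by_cases hcm : c = m
    · subst hcm
      rw [blankRow_getD_ge prev row c c (le_refl c)]
      split_ifs with h
      · have hlen : c < (pvBlankRow prev row c).length := by
          rw [blankRow_length]
          by_contra hge
          exact h.1 (by
            rw [List.getD_eq_getElem?_getD, List.getElem?_eq_none (by omega)]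
            rfl)
        rw [List.getD_eq_getElem?_getD, List.getElem?_set_self hlen]
        rfl
      · exact blankRow_getD_ge prev row c c (le_refl c)
    · have hderiv : c < m := by omega
      split
      · rw [List.getD_eq_getElem?_getD, List.getElem?_set_ne (by omega),
          ← List.getD_eq_getElem?_getD, ih hderiv]
      · exact ih hderiv

theorem main_equiv (g : List (List String))
    (hpre : ∀ row ∈ g, (g.headD []).length ≤ row.length) :
    blank_vertical_block_text_py g = blank_vertical_block_text_py_alt g := by
  match g with
  | [] => rfl
  | h :: t =>
    have hA : blank_vertical_block_text_py (h :: t)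
        = (List.range h.length).foldl (fun o c => pvRowLoop o c (h :: t).length 0) (h :: t) := by
      rw [blank_vertical_block_text_py, if_neg (by simp)]
      rfl
    obtain ⟨hA1, hA2, hA3⟩ := foldCols_spec (h :: t) hpre h.length (le_refl _)
    rw [hA]
    show _ = h :: ((h :: t).zip t).map (fun pr => pvBlankRow pr.1 pr.2 h.length)
    set A := (List.range h.length).foldl (fun o c => pvRowLoop o c (h :: t).length 0) (h :: t)
      with hAdef
    have hAlen : A.length = t.length + 1 := hA1
    have hzlen : ((h :: t).zip t).length = t.length := by
      rw [List.length_zip]; simp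
    apply List.ext_getElem
    · rw [hAlen]
      simp [hzlen]
    · intro i hi1 hi2
      have hi : i < t.length + 1 := by rwa [hAlen] at hi1
      have hAi : A[i] = A.getD i [] := (List.getD_eq_getElem A [] hi1).symm
      have hAilen : A[i].length = ((h :: t).getD i []).length := by rw [hAi, hA2 i]
      have hgilen : ((h :: t).getD i []).length = (h :: t)[i].length := by
        exact congrArg List.length (List.getD_eq_getElem (h :: t) [] (by simpa using hi))
      apply List.ext_getElem
      · rw [hAilen, hgilen]
        cases i with
        | zero => rfl
        | succ j =>
          have hjt : j < t.length := by omega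
          simp only [List.getElem_cons_succ, List.getElem_map, List.getElem_zip]
          rw [blankRow_length]
      · intro cc hc1 hc2
        have hcell : A[i][cc] = pvCell A i cc := by
          rw [pvCell, ← hAi, List.getD_eq_getElem A[i] "" hc1]
        rw [hcell, hA3 i cc]
        cases i with
        | zero =>
          rw [if_neg (fun hx => ((pvRule_iff ..).mp hx.2.2).1 rfl)]
          simp only [List.getElem_cons_zero]
          rw [pvCell]
          simp only [List.getD_cons_zero]
          rw [List.getD_eq_getElem h "" (by simpa [hAilen, hgilen] using hc1)]
        | succ j =>
          have hjt : j < t.length := by omega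
          simp only [List.getElem_cons_succ, List.getElem_map, List.getElem_zip]
          have hcc : cc < t[j].length := by
            have h2 := hc1
            rw [hAilen, hgilen] at h2
            simpa using h2
          have hcc' : cc < (pvBlankRow (h :: t)[j] t[j] h.length).length := by
            rw [blankRow_length]; exact hcc
          rw [← List.getD_eq_getElem (pvBlankRow (h :: t)[j] t[j] h.length) "" hcc']
          have hpv1 : pvCell (h :: t) (j + 1) cc = t[j].getD cc "" := by
            rw [pvCell]
            simp only [List.getD_cons_succ]
            rw [List.getD_eq_getElem t [] hjt]
          have hpv0 : pvCell (h :: t) j cc = (h :: t)[j].getD cc "" := by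
            rw [pvCell]
            exact congrArg (fun l => List.getD l cc "")
              (List.getD_eq_getElem (h :: t) [] (by simp; omega))
          by_cases hccw : cc < h.length
          · rw [blankRow_getD_lt _ _ _ _ hccw]
            by_cases hcond : t[j].getD cc "" ≠ "" ∧ t[j].getD cc "" = (h :: t)[j].getD cc ""
            · rw [if_pos hcond, if_pos ⟨hccw, by simpa using hjt, (pvRule_iff ..).mpr
                ⟨by omega, by rw [hpv1]; exact hcond.1, by
                  rw [hpv1]
                  simp only [Nat.add_sub_cancel]
                  rw [hpv0]; exact hcond.2⟩⟩]
            · rw [if_neg (fun hx => hcond (by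
                obtain ⟨-, hx2, hx3⟩ := (pvRule_iff ..).mp hx.2.2
                simp only [Nat.add_sub_cancel] at hx3
                rw [hpv1, hpv0] at hx3
                rw [hpv1] at hx2
                exact ⟨hx2, hx3⟩)), hpv1, if_neg hcond]
          · rw [blankRow_getD_ge _ _ _ _ (by omega), if_neg (fun hx => hccw hx.1), hpv1]

-- ===== VERDICT (by name: the statement is the Claim_ definition above) =====
theorem blank_vertical_block_text_py_spec : Claim_equal_blank_vertical_block_text_py := by
  intro g _ hpre
  exact main_equiv g hpre
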